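-- pv_equiv track=rewrite | github.com/benquick123/code-profiling | code/batch-2/vse-naloge-brez-testov/DN7-M-036.py | varen_premik
-- ===== SOURCE A (Python) =====
-- def varen_premik(x0, y0, x1, y1, mine):
--     """
--     Vrni `True`, če je pomik z (x0, y0) and (x1, y1) varen, `False`, če ni.
--
--     Args:
--         x0 (int): koordinata x začetnega polja
--         y0 (int): koordinata y začetnega polja
--         x1 (int): koordinata x končnega polja
--         y1 (int): koordinata y končnega polja
--         mine (set of tuple of int): koordinate min
--
--     Returns:
--         bool: `True`, če je premik varen, `False`, če ni.
--     """
--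
--     if x1 > x0:
--         return all(([(x, y) not in mine for x in range(x0, x1 + 1) for y in range(y0, y1 + 1)]))
--     elif x0 > x1:
--         return all(([(x, y) not in mine for x in range(x1, x0 + 1) for y in range(y0, y1 + 1)]))
--     elif y1 > y0:
--         return all(([(x, y) not in mine for x in range(x0, x1 + 1) for y in range(y0, y1 + 1)]))
--     elif y0 > y1:
--         return all(([(x, y) not in mine for x in range(x0, x1 + 1) for y in range(y1, y0 + 1)]))
-- ===== SOURCE B (Python) =====
-- def varen_premik(x0, y0, x1, y1, mine):
--     """Scan the mines against the branch's rectangle bounds instead of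
--     enumerating every cell of the region."""
--     if x1 > x0:
--         xlo, xhi, ylo, yhi = x0, x1, y0, y1
--     elif x0 > x1:
--         xlo, xhi, ylo, yhi = x1, x0, y0, y1
--     elif y1 > y0:
--         xlo, xhi, ylo, yhi = x0, x0, y0, y1
--     elif y0 > y1:
--         xlo, xhi, ylo, yhi = x0, x0, y1, y0
--     else:
--         return True
--     return not any(xlo <= mx <= xhi and ylo <= my <= yhi for (mx, my) in mine)
-- ===== Notes on version B (the rewrite author's own statement) =====
-- stated objective: faster
-- what changed: Instead of enumerating every cell of the move's rectangle and testing membership in the mine set, B derives the rectangle bounds of each branch and makes one pass over the mines checking each against the bounds.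
-- outside the precondition, e.g. on varen_premik(0, 0, 0, 0, set()): A returns None, B returns True
import Mathlib
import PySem

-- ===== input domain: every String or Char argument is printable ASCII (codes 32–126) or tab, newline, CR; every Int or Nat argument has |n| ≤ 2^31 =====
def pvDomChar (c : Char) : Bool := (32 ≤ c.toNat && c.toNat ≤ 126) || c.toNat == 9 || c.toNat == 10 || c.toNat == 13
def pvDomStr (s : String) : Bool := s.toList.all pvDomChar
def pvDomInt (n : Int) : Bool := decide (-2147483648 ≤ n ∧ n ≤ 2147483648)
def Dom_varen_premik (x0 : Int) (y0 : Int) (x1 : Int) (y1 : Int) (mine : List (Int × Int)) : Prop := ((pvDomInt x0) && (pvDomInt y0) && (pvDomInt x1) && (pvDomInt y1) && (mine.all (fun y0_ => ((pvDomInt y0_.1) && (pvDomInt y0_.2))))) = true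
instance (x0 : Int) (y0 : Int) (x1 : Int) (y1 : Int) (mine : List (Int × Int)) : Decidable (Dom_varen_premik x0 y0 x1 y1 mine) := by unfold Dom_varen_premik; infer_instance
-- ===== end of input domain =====

-- B replaces A's cell-by-cell scan of the whole rectangle with a single pass over the
-- mines against the rectangle bounds (asymptotically faster: O(|mine|) vs O(area·|mine|)).

-- ===== PORT A =====
def varen_premik (x0 : Int) (y0 : Int) (x1 : Int) (y1 : Int) (mine : List (Int × Int)) : Bool :=
  if x1 > x0 then
    (((PySem.List.pyRange x0 (x1 + 1) 1).flatMap (fun x =>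
      (PySem.List.pyRange y0 (y1 + 1) 1).map (fun y => !mine.contains (x, y)))).all id)
  else if x0 > x1 then
    (((PySem.List.pyRange x1 (x0 + 1) 1).flatMap (fun x =>
      (PySem.List.pyRange y0 (y1 + 1) 1).map (fun y => !mine.contains (x, y)))).all id)
  else if y1 > y0 then
    (((PySem.List.pyRange x0 (x1 + 1) 1).flatMap (fun x =>
      (PySem.List.pyRange y0 (y1 + 1) 1).map (fun y => !mine.contains (x, y)))).all id)
  else if y0 > y1 then
    (((PySem.List.pyRange x0 (x1 + 1) 1).flatMap (fun x =>
      (PySem.List.pyRange y1 (y0 + 1) 1).map (fun y => !mine.contains (x, y)))).all id)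
  else
    false  -- Python returns None here; excluded by Pre_

-- ===== PORT B =====
def varen_premik_alt (x0 : Int) (y0 : Int) (x1 : Int) (y1 : Int) (mine : List (Int × Int)) : Bool :=
  if x1 > x0 then
    !mine.any (fun p => x0 ≤ p.1 && p.1 ≤ x1 && y0 ≤ p.2 && p.2 ≤ y1)
  else if x0 > x1 then
    !mine.any (fun p => x1 ≤ p.1 && p.1 ≤ x0 && y0 ≤ p.2 && p.2 ≤ y1)
  else if y1 > y0 then
    !mine.any (fun p => x0 ≤ p.1 && p.1 ≤ x0 && y0 ≤ p.2 && p.2 ≤ y1)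
  else if y0 > y1 then
    !mine.any (fun p => x0 ≤ p.1 && p.1 ≤ x0 && y1 ≤ p.2 && p.2 ≤ y0)
  else
    true

-- ===== PRECONDITION & SPEC =====
-- Pre_ excludes only the equal-endpoints inputs (x0 = x1 and y0 = y1), on which A falls
-- through all branches and returns None, not a bool of the declared return type.
def Pre_varen_premik (x0 : Int) (y0 : Int) (x1 : Int) (y1 : Int) (_mine : List (Int × Int)) : Prop :=
  ¬ (x0 = x1 ∧ y0 = y1)
instance (x0 : Int) (y0 : Int) (x1 : Int) (y1 : Int) (mine : List (Int × Int)) : Decidable (Pre_varen_premik x0 y0 x1 y1 mine) := by unfold Pre_varen_premik; infer_instance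

def pvWitness_varen_premik : Int × Int × Int × Int × (List (Int × Int)) := (0, 0, 2, 1, [(1, 1)])

def Spec_varen_premik (x0 : Int) (y0 : Int) (x1 : Int) (y1 : Int) (mine : List (Int × Int)) (out : Bool) : Prop := out = varen_premik_alt x0 y0 x1 y1 mine
instance (x0 : Int) (y0 : Int) (x1 : Int) (y1 : Int) (mine : List (Int × Int)) (out : Bool) : Decidable (Spec_varen_premik x0 y0 x1 y1 mine out) := by unfold Spec_varen_premik; infer_instance

-- ===== CLAIM (what is proved, stated in full; the proofs are below) =====
def Claim_equal_varen_premik : Prop := ∀ (x0 : Int) (y0 : Int) (x1 : Int) (y1 : Int) (mine : List (Int × Int)), Dom_varen_premik x0 y0 x1 y1 mine → Pre_varen_premik x0 y0 x1 y1 mine → Spec_varen_premik x0 y0 x1 y1 mine (varen_premik x0 y0 x1 y1 mine)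

-- ===== LEMMAS AND PROOFS =====

-- A's rectangle scan over [a, b] × [c, d] equals B's bounds check over the mines.
theorem rect_all_eq_not_any (a b c d : Int) (mine : List (Int × Int)) :
    (((PySem.List.pyRange a (b + 1) 1).flatMap (fun x =>
      (PySem.List.pyRange c (d + 1) 1).map (fun y => !mine.contains (x, y)))).all id)
    = !mine.any (fun p => a ≤ p.1 && p.1 ≤ b && c ≤ p.2 && p.2 ≤ d) := by
  rw [Bool.eq_iff_iff]
  simp [PySem.List.mem_pyRange_one]
  constructor
  · intro h mx my hm ha hb hc
    by_contra hd
    push_neg at hd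
    exact h mx ha hb my hc hd hm
  · intro h x hax hxb y hcy hyd hm
    exact absurd (h x y hm hax hxb hcy) (by omega)

-- ===== VERDICT (by name: the statement is the Claim_ definition above) =====
theorem varen_premik_spec : Claim_equal_varen_premik := by
  intro x0 y0 x1 y1 mine _ hpre
  unfold Spec_varen_premik varen_premik varen_premik_alt
  unfold Pre_varen_premik at hpre
  split_ifs with h1 h2 h3 h4
  · exact rect_all_eq_not_any x0 x1 y0 y1 mine
  · exact rect_all_eq_not_any x1 x0 y0 y1 mine
  · have : x0 = x1 := by omega
    subst this
    exact rect_all_eq_not_any x0 x0 y0 y1 mine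
  · have : x0 = x1 := by omega
    subst this
    exact rect_all_eq_not_any x0 x0 y1 y0 mine
  · exact absurd ⟨by omega, by omega⟩ hpre
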